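-- pv_equiv track=rewrite | github.com/domingogallardo/docflow | utils/tweet_to_markdown.py | _split_image_urls
-- ===== SOURCE A (Python) =====
-- from typing import List, Optional, Tuple
--
-- def _split_image_urls(image_urls: List[str]) -> Tuple[Optional[str], List[str]]:
--     avatar = None
--     media: List[str] = []
--     for url in image_urls:
--         if avatar is None and "profile_images" in url:
--             avatar = url
--             continue
--         media.append(url)
--     return avatar, media
-- ===== SOURCE B (Python) =====
-- from typing import List, Optional, Tuple
--
-- def _split_image_urls(image_urls: List[str]) -> Tuple[Optional[str], List[str]]:
--     idx = next((i for i, u in enumerate(image_urls) if "profile_images" in u), None)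
--     if idx is None:
--         return None, list(image_urls)
--     return image_urls[idx], image_urls[:idx] + image_urls[idx + 1:]
-- ===== Notes on version B (the rewrite author's own statement) =====
-- stated objective: alternative
-- what changed: B locates the index of the first avatar URL with next(enumerate(...)) and rebuilds media by slicing around it, instead of A's single accumulating partition pass with a mutable avatar flag.
import Mathlib
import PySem

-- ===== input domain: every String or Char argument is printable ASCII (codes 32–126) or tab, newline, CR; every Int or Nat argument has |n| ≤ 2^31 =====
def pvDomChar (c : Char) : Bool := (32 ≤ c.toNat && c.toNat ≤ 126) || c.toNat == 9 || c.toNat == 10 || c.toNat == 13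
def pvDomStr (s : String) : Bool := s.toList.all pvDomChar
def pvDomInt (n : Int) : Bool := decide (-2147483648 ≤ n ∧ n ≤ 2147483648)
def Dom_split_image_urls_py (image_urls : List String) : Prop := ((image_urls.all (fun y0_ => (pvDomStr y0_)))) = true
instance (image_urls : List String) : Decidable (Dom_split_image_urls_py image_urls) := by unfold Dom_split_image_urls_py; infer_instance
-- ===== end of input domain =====

-- B finds the index of the first URL containing "profile_images" and rebuilds media by
-- slicing around it, instead of A's accumulating partition pass (objective: alternative).

-- ===== PORT A =====
-- loop body of A: state = (avatar, media)
def splitStepA (st : Option String × List String) (url : String) : Option String × List String :=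
  if st.1.isNone && PySem.Str.isIn "profile_images" url then (some url, st.2)
  else (st.1, st.2 ++ [url])

def split_image_urls_py (image_urls : List String) : Option String × List String :=
  image_urls.foldl splitStepA (none, [])

-- ===== PORT B =====
def split_image_urls_py_alt (image_urls : List String) : Option String × List String :=
  match image_urls.findIdx? (fun u => PySem.Str.isIn "profile_images" u) with
  | none => (none, image_urls)
  | some i =>
      (PySem.List.pyGet? image_urls (i : Int),
       PySem.List.slice image_urls none (some (i : Int)) ++
         PySem.List.slice image_urls (some ((i + 1 : Nat) : Int)) none)

-- ===== PRECONDITION & SPEC =====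
def Spec_split_image_urls_py (image_urls : List String) (out : Option String × List String) : Prop := out = split_image_urls_py_alt image_urls
instance (image_urls : List String) (out : Option String × List String) : Decidable (Spec_split_image_urls_py image_urls out) := by unfold Spec_split_image_urls_py; infer_instance

-- ===== CLAIM (what is proved, stated in full; the proofs are below) =====
def Claim_equal_split_image_urls_py : Prop := ∀ (image_urls : List String), Dom_split_image_urls_py image_urls → Spec_split_image_urls_py image_urls (split_image_urls_py image_urls)

-- ===== LEMMAS AND PROOFS =====

-- generic step (splitStepA with the substring test abstracted)
def gStep (p : String → Bool) (st : Option String × List String) (url : String) :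
    Option String × List String :=
  if st.1.isNone && p url then (some url, st.2) else (st.1, st.2 ++ [url])

theorem splitStepA_eq_gStep :
    splitStepA = gStep (fun u => PySem.Str.isIn "profile_images" u) := rfl

-- once the avatar is found, the loop only appends
theorem foldl_gStep_some (p : String → Bool) (xs : List String) (a : String)
    (acc : List String) : xs.foldl (gStep p) (some a, acc) = (some a, acc ++ xs) := by
  induction xs generalizing acc with
  | nil => simp
  | cons u rest ih => simp [gStep, ih]

-- characterisation of the loop from the 'no avatar yet' state
theorem foldl_gStep_none (p : String → Bool) (xs : List String) (acc : List String) :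
    xs.foldl (gStep p) (none, acc) =
      match xs.findIdx? p with
      | none => (none, acc ++ xs)
      | some i => (xs[i]?, acc ++ (xs.take i ++ xs.drop (i + 1))) := by
  induction xs generalizing acc with
  | nil => simp
  | cons u rest ih =>
    by_cases h : p u
    · simp [List.findIdx?_cons, h, gStep, foldl_gStep_some]
    · rw [show (u :: rest).foldl (gStep p) (none, acc)
          = rest.foldl (gStep p) (none, acc ++ [u]) by simp [gStep, h]]
      rw [ih]
      cases hfi : rest.findIdx? p with
      | none => simp [List.findIdx?_cons, h, hfi]
      | some j => simp [List.findIdx?_cons, h, hfi]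

-- ===== VERDICT (by name: the statement is the Claim_ definition above) =====
theorem split_image_urls_py_spec : Claim_equal_split_image_urls_py := by
  intro xs _
  unfold Spec_split_image_urls_py split_image_urls_py split_image_urls_py_alt
  rw [splitStepA_eq_gStep, foldl_gStep_none]
  cases hfi : xs.findIdx? (fun u => PySem.Str.isIn "profile_images" u) with
  | none => rfl
  | some i =>
    simp only
    rw [PySem.List.pyGet?_natCast, PySem.List.slice_to_natCast,
      PySem.List.slice_from_natCast]
    simp
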